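-- pv_equiv track=rewrite | github.com/autogluon/tabrepo | tabrepo/repository/evaluation_repository_collection.py | _combination_mapping_to_repo_index
-- ===== SOURCE A (Python) =====
-- from typing import List, Literal, Tuple
--
-- def _combination_mapping_to_repo_index(
--     combinations: list[list[Tuple[str, int, str]]],
--     overlap: Literal["raise", "first", "last"] = "raise",
-- ) -> dict[Tuple[str, int, str], int]:
--     """
--     Returns a dictionary mapping each (dataset, fold, config) to the repository index
--     """
--     if overlap == "first":
--         len_combinations = len(combinations)
--         mapping = {
--             (dataset, fold, config): repo_index
--             for repo_index in range(len_combinations-1, -1, -1)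
--             for (dataset, fold, config) in combinations[repo_index]
--         }
--     elif overlap in ["last", "raise"]:
--         mapping = {
--             (dataset, fold, config): repo_index
--             for repo_index, repo_combinations in enumerate(combinations)
--             for (dataset, fold, config) in repo_combinations
--         }
--         if overlap == "raise":
--             len_combinations_total = 0
--             for c in combinations:
--                 len_combinations_total += len(c)
--             if len_combinations_total != len(mapping):
--                 # TODO: Improve error message
--                 raise AssertionError(f"Overlap detected in provided repositories! (overlap='{overlap}')")
--     else:
--         raise ValueError(f"Unknown overlap value: '{overlap}'")
--     return mapping
-- ===== SOURCE B (Python) =====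
-- from typing import List, Literal, Tuple
--
--
-- def _combination_mapping_to_repo_index(
--     combinations: list[list[Tuple[str, int, str]]],
--     overlap: Literal["raise", "first", "last"] = "raise",
-- ) -> dict[Tuple[str, int, str], int]:
--     """
--     Returns a dictionary mapping each (dataset, fold, config) to the repository index.
--
--     Builds the result BACK-TO-FRONT: one reverse loop over the repositories; for
--     'last'/'raise' each repository becomes a small dict that is merged in front of
--     the mapping accumulated so far (the accumulated, higher-index entries win, which
--     is exactly 'later index wins'); 'raise' additionally checks, per repository,
--     duplicate keys inside it and intersection with the accumulated mapping.
--     For 'first' the reverse loop simply overwrites, so the lowest index wins.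
--     """
--     if overlap not in ("raise", "first", "last"):
--         raise ValueError(f"Unknown overlap value: '{overlap}'")
--     mapping: dict = {}
--     for repo_index in range(len(combinations) - 1, -1, -1):
--         repo = combinations[repo_index]
--         if overlap == "first":
--             for key in repo:
--                 mapping[key] = repo_index
--         else:
--             head: dict = {}
--             for key in repo:
--                 if overlap == "raise" and key in head:
--                     raise AssertionError(f"Overlap detected in provided repositories! (overlap='{overlap}')")
--                 head[key] = repo_index
--             if overlap == "raise" and head.keys() & mapping.keys():
--                 raise AssertionError(f"Overlap detected in provided repositories! (overlap='{overlap}')")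
--             head.update(mapping)
--             mapping = head
--     return mapping
-- ===== Notes on version B (the rewrite author's own statement) =====
-- stated objective: alternative
-- what changed: B builds the mapping back-to-front in a single reverse loop: for 'last'/'raise' each repository becomes a small dict that is merged in front of the accumulated mapping of the later repositories (accumulated entries win, giving later-index-wins), with 'raise' checking per-repository duplicates and head/accumulator key intersection during the traversal, instead of A's forward enumerate comprehension plus a separate global length-sum-vs-dict-size comparison.
import Mathlib
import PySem

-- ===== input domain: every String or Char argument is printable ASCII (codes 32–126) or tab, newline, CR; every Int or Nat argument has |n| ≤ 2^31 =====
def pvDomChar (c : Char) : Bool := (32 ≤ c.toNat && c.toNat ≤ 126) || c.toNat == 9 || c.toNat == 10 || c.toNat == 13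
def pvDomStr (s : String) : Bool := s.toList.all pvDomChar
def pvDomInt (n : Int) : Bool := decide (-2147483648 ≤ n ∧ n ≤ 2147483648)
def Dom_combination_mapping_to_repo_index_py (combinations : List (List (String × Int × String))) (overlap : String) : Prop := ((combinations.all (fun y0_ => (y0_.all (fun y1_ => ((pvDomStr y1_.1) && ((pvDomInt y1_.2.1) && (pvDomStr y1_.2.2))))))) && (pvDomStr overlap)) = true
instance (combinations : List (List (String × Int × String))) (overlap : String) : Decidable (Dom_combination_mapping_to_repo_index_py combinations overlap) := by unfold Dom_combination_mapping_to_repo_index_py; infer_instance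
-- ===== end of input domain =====

-- B builds the mapping BACK-TO-FRONT: one reverse loop over the repositories; for
-- 'last'/'raise' each repository becomes a small dict merged in front of the mapping
-- accumulated so far (accumulated higher-index entries win), with 'raise' checking
-- per-repository duplicates and intersection with the accumulator, instead of A's
-- forward comprehensions plus a global length comparison (objective: alternative).

-- ===== PORT A =====
def combination_mapping_to_repo_index_py (combinations : List (List (String × Int × String))) (overlap : String) : List (String × Int × String × Int) :=
  if overlap == "first" then
    let len_combinations : Int := combinations.length
    let mapping : PySem.Dict (String × Int × String) Int :=
      (PySem.List.pyRange (len_combinations - 1) (-1) (-1)).foldl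
        (fun m repo_index =>
          (PySem.List.pyGetD combinations repo_index []).foldl
            (fun m key => m.insert key repo_index) m)
        PySem.Dict.empty
    mapping.items.map (fun p => (p.1.1, p.1.2.1, p.1.2.2, p.2))
  else if overlap == "last" || overlap == "raise" then
    let mapping : PySem.Dict (String × Int × String) Int :=
      (PySem.List.enumerate combinations).foldl
        (fun m ic => ic.2.foldl (fun m key => m.insert key ic.1) m)
        PySem.Dict.empty
    if overlap == "raise" then
      let len_combinations_total : Int := combinations.foldl (fun s c => s + (c.length : Int)) 0
      if len_combinations_total != (mapping.size : Int) then
        -- Python raises AssertionError here; excluded by Pre_, so the port returns the mapping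
        mapping.items.map (fun p => (p.1.1, p.1.2.1, p.1.2.2, p.2))
      else
        mapping.items.map (fun p => (p.1.1, p.1.2.1, p.1.2.2, p.2))
    else
      mapping.items.map (fun p => (p.1.1, p.1.2.1, p.1.2.2, p.2))
  else
    []  -- Python raises ValueError here; excluded by Pre_

-- ===== PORT B =====
-- inner head-building loop of B; none = Python B raises AssertionError (excluded by Pre_)
def pvB_head (overlap : String) (repo_index : Int)
    (h : PySem.Dict (String × Int × String) Int) :
    List (String × Int × String) → Option (PySem.Dict (String × Int × String) Int)
  | [] => some h
  | key :: rest =>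
    if overlap == "raise" && h.contains key then none
    else pvB_head overlap repo_index (h.insert key repo_index) rest

-- B's reverse loop over repository indices; none = Python B raises AssertionError
def pvB_loop (combinations : List (List (String × Int × String))) (overlap : String)
    (m : PySem.Dict (String × Int × String) Int) :
    List Int → Option (PySem.Dict (String × Int × String) Int)
  | [] => some m
  | repo_index :: rest =>
    let repo := PySem.List.pyGetD combinations repo_index []
    if overlap == "first" then
      pvB_loop combinations overlap (repo.foldl (fun d key => d.insert key repo_index) m) rest
    else
      match pvB_head overlap repo_index PySem.Dict.empty repo with
      | none => none
      | some head =>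
        if overlap == "raise" && head.items.any (fun p => m.contains p.1) then none
        else pvB_loop combinations overlap (head.update m.items) rest

def combination_mapping_to_repo_index_py_alt (combinations : List (List (String × Int × String))) (overlap : String) : List (String × Int × String × Int) :=
  if !(overlap == "raise" || overlap == "first" || overlap == "last") then
    []  -- Python B raises ValueError here; excluded by Pre_
  else
    match pvB_loop combinations overlap PySem.Dict.empty
        (PySem.List.pyRange ((combinations.length : Int) - 1) (-1) (-1)) with
    | some mapping => mapping.items.map (fun p => (p.1.1, p.1.2.1, p.1.2.2, p.2))
    | none => []  -- Python B raises AssertionError here; excluded by Pre_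

-- ===== PRECONDITION & SPEC =====
-- Pre_ excludes exactly the inputs where A raises: an unknown overlap value (ValueError) and
-- overlap='raise' with a duplicated (dataset, fold, config) tuple (AssertionError); B raises there too.
def Pre_combination_mapping_to_repo_index_py (combinations : List (List (String × Int × String))) (overlap : String) : Prop :=
  overlap = "first" ∨ overlap = "last" ∨ (overlap = "raise" ∧ combinations.flatten.Nodup)
instance (combinations : List (List (String × Int × String))) (overlap : String) : Decidable (Pre_combination_mapping_to_repo_index_py combinations overlap) := by unfold Pre_combination_mapping_to_repo_index_py; infer_instance
def pvWitness_combination_mapping_to_repo_index_py : (List (List (String × Int × String))) × String :=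
  ([[("a", 0, "c1")], [("b", 1, "c2")]], "raise")
def Spec_combination_mapping_to_repo_index_py (combinations : List (List (String × Int × String))) (overlap : String) (out : List (String × Int × String × Int)) : Prop := out = combination_mapping_to_repo_index_py_alt combinations overlap
instance (combinations : List (List (String × Int × String))) (overlap : String) (out : List (String × Int × String × Int)) : Decidable (Spec_combination_mapping_to_repo_index_py combinations overlap out) := by unfold Spec_combination_mapping_to_repo_index_py; infer_instance

-- ===== CLAIM (what is proved, stated in full; the proofs are below) =====
def Claim_equal_combination_mapping_to_repo_index_py : Prop := ∀ (combinations : List (List (String × Int × String))) (overlap : String), Dom_combination_mapping_to_repo_index_py combinations overlap → Pre_combination_mapping_to_repo_index_py combinations overlap → Spec_combination_mapping_to_repo_index_py combinations overlap (combination_mapping_to_repo_index_py combinations overlap)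

-- ===== LEMMAS AND PROOFS =====

-- updating the value at a key already present commutes with inserting a different key
lemma pvInsert_comm (d : PySem.Dict (String × Int × String) Int)
    (k q1 : String × Int × String) (v q2 : Int)
    (hk : d.contains k = true) (hq : q1 ≠ k) :
    (d.insert q1 q2).insert k v = (d.insert k v).insert q1 q2 := by
  apply PySem.Dict.ext
  have hck : (d.insert q1 q2).contains k = true := by
    rw [PySem.Dict.contains_insert]; simp [hk]
  have hck2 : (d.insert k v).contains q1 = d.contains q1 := by
    rw [PySem.Dict.contains_insert]; simp [hq]
  by_cases hcq : d.contains q1 = true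
  · rw [PySem.Dict.items_insert_of_contains _ _ hck,
        PySem.Dict.items_insert_of_contains _ _ hcq,
        PySem.Dict.items_insert_of_contains _ _ (hck2.trans hcq),
        PySem.Dict.items_insert_of_contains _ _ hk, List.map_map, List.map_map]
    apply List.map_congr_left
    intro p _
    simp only [Function.comp_apply]
    have hkq : ¬ (k = q1) := fun h => hq h.symm
    by_cases h1 : p.1 = q1
    · simp [h1, hq]
    · by_cases h2 : p.1 = k
      · simp [h2, hkq]
      · simp [h1, h2]
  · have hcq' : d.contains q1 = false := by simpa using hcq
    rw [PySem.Dict.items_insert_of_contains _ _ hck,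
        PySem.Dict.items_insert_of_not_contains _ _ hcq',
        PySem.Dict.items_insert_of_not_contains _ _ (hck2.trans hcq'),
        PySem.Dict.items_insert_of_contains _ _ hk,
        List.map_append]
    simp [hq]

-- an insert at a key already present floats past a fold over fresh-keyed pairs
lemma pvInsert_late (post : List ((String × Int × String) × Int))
    (d : PySem.Dict (String × Int × String) Int) (k : String × Int × String) (v : Int)
    (hk : d.contains k = true) (hpost : ∀ p ∈ post, p.1 ≠ k) :
    (post.foldl (fun d p => d.insert p.1 p.2) d).insert k v
      = post.foldl (fun d p => d.insert p.1 p.2) (d.insert k v) := by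
  induction post generalizing d with
  | nil => rfl
  | cons p ps ih =>
    simp only [List.foldl_cons]
    rw [ih (d.insert p.1 p.2)
          (by rw [PySem.Dict.contains_insert]; simp [hk])
          (fun q hq => hpost q (List.mem_cons_of_mem _ hq)),
        pvInsert_comm d k p.1 v p.2 hk (hpost p List.mem_cons_self)]

-- membership in a dict built by inserting a list of pairs
lemma pvContains_foldl_pairs (Q : List ((String × Int × String) × Int))
    (m : PySem.Dict (String × Int × String) Int) (k : String × Int × String) :
    (Q.foldl (fun d p => d.insert p.1 p.2) m).contains k
      = ((Q.map (·.1)).contains k || m.contains k) := by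
  induction Q generalizing m with
  | nil => simp
  | cons p ps ih =>
    simp only [List.foldl_cons, List.map_cons, List.contains_cons, ih,
      PySem.Dict.contains_insert]
    cases hkp : (k == p.1) <;> cases hm : m.contains k <;> simp

-- folding a value-replaced items list = folding the original and re-inserting the key
lemma pvFoldl_map_replace (its : List ((String × Int × String) × Int))
    (m : PySem.Dict (String × Int × String) Int) (k : String × Int × String) (v : Int)
    (hnd : (its.map (·.1)).Nodup) :
    (its.map (fun p => if p.1 == k then (k, v) else p)).foldl (fun d p => d.insert p.1 p.2) m
      = if k ∈ its.map (·.1) then (its.foldl (fun d p => d.insert p.1 p.2) m).insert k v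
        else its.foldl (fun d p => d.insert p.1 p.2) m := by
  induction its generalizing m with
  | nil => simp
  | cons p ps ih =>
    simp only [List.map_cons, List.nodup_cons] at hnd
    by_cases h1 : p.1 = k
    · have hrest : ∀ q ∈ ps, q.1 ≠ k := by
        intro q hq he
        exact hnd.1 (by rw [h1, ← he]; exact List.mem_map_of_mem hq)
      have hmapid : ps.map (fun p => if p.1 == k then (k, v) else p) = ps := by
        conv_rhs => rw [← List.map_id ps]
        exact List.map_congr_left (fun q hq => by simp [hrest q hq])
      simp only [List.foldl_cons, List.map_cons, h1, beq_self_eq_true, if_true,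
        List.mem_cons, hmapid, true_or]
      rw [pvInsert_late ps (m.insert k p.2) k v
            (by rw [PySem.Dict.contains_insert]; simp) hrest,
          PySem.Dict.insert_insert_self]
    · have hne : ¬ (k = p.1) := fun h => h1 h.symm
      simp only [List.foldl_cons, List.map_cons, beq_eq_false_iff_ne.mpr h1,
        Bool.false_eq_true, if_false, List.mem_cons, hne, false_or]
      exact ih (m.insert p.1 p.2) hnd.2

-- folding the ITEMS of a dict built from pairs = folding the pairs directly
lemma pvFoldl_items (Q : List ((String × Int × String) × Int))
    (m : PySem.Dict (String × Int × String) Int) :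
    ((Q.foldl (fun d p => d.insert p.1 p.2) PySem.Dict.empty).items).foldl
        (fun d p => d.insert p.1 p.2) m
      = Q.foldl (fun d p => d.insert p.1 p.2) m := by
  induction Q using List.reverseRecOn with
  | nil => rfl
  | append_singleton Q p ih =>
    have hnd : (Q.foldl (fun d p => d.insert p.1 p.2) PySem.Dict.empty).keys.Nodup :=
      PySem.Dict.nodup_keys_foldl_insert_key Q (·.1) (fun _ p => p.2) PySem.Dict.empty
        (PySem.Dict.nodup_keys_empty)
    simp only [List.foldl_append, List.foldl_cons, List.foldl_nil]
    by_cases hc : (Q.foldl (fun d p => d.insert p.1 p.2) PySem.Dict.empty).contains p.1 = true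
    · rw [PySem.Dict.items_insert_of_contains _ _ hc]
      rw [pvFoldl_map_replace _ m p.1 p.2 hnd]
      rw [if_pos (show _ from by
        simpa [PySem.Dict.keys] using (PySem.Dict.contains_iff_mem_keys _ _).mp hc)]
      rw [ih]
    · have hc' : (Q.foldl (fun d p => d.insert p.1 p.2) PySem.Dict.empty).contains p.1 = false := by
        simpa using hc
      rw [PySem.Dict.items_insert_of_not_contains _ _ hc']
      simp only [List.foldl_append, List.foldl_cons, List.foldl_nil, ih]

-- B's head loop returns the plain insertion fold when it cannot raise
lemma pvB_head_eq (overlap : String) (i : Int) (l : List (String × Int × String))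
    (h : PySem.Dict (String × Int × String) Int)
    (hok : overlap = "raise" → l.Nodup ∧ ∀ k ∈ l, h.contains k = false) :
    pvB_head overlap i h l = some (l.foldl (fun d k => d.insert k i) h) := by
  induction l generalizing h with
  | nil => rfl
  | cons x xs ih =>
    have hguard : (overlap == "raise" && h.contains x) = false := by
      by_cases ho : overlap = "raise"
      · simp [ho, (hok ho).2 x List.mem_cons_self]
      · simp [ho]
    simp only [pvB_head, hguard, Bool.false_eq_true, if_false, List.foldl_cons]
    exact ih (h.insert x i) (fun ho => by
      rcases hok ho with ⟨hnd, hfr⟩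
      refine ⟨(List.nodup_cons.mp hnd).2, fun k hk => ?_⟩
      rw [PySem.Dict.contains_insert]
      have hne : k ≠ x := fun he => (List.nodup_cons.mp hnd).1 (he ▸ hk)
      simp [hne, hfr k (List.mem_cons_of_mem _ hk)])

-- the key-index pairs of repositories j.. and the dict they build forward
def pvPairs (cs : List (List (String × Int × String))) (j : Nat) : List ((String × Int × String) × Int) :=
  (PySem.List.enumerate (cs.drop j) j).flatMap (fun ic => ic.2.map (fun k => (k, ic.1)))

def pvR (cs : List (List (String × Int × String))) (j : Nat) : PySem.Dict (String × Int × String) Int :=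
  (pvPairs cs j).foldl (fun d p => d.insert p.1 p.2) PySem.Dict.empty

lemma pvPairs_succ (cs : List (List (String × Int × String))) (j : Nat) (hj : j < cs.length) :
    pvPairs cs j = cs[j].map (fun k => (k, (j : Int))) ++ pvPairs cs (j + 1) := by
  unfold pvPairs
  rw [List.drop_eq_getElem_cons hj, PySem.List.enumerate_cons, List.flatMap_cons]
  norm_num

lemma pvPairs_fst_aux (l : List (List (String × Int × String))) (s : Int) :
    ((PySem.List.enumerate l s).flatMap (fun ic => ic.2.map (fun k => (k, ic.1)))).map (·.1)
      = l.flatten := by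
  induction l generalizing s with
  | nil => rfl
  | cons c rest ih =>
    rw [PySem.List.enumerate_cons, List.flatMap_cons, List.map_append, List.flatten_cons,
      List.map_map, ih]
    congr 1
    conv_rhs => rw [← List.map_id c]
    exact List.map_congr_left (fun k _ => rfl)

lemma pvPairs_fst (cs : List (List (String × Int × String))) (j : Nat) :
    (pvPairs cs j).map (·.1) = (cs.drop j).flatten := pvPairs_fst_aux _ _

-- nested insertion fold over (index, repo) pairs = flat fold over the key-index pairs
lemma pvNested_eq_pairs (l : List (Int × List (String × Int × String)))
    (d : PySem.Dict (String × Int × String) Int) :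
    l.foldl (fun m ic => ic.2.foldl (fun m key => m.insert key ic.1) m) d
      = (l.flatMap (fun ic => ic.2.map (fun k => (k, ic.1)))).foldl
          (fun m p => m.insert p.1 p.2) d := by
  induction l generalizing d with
  | nil => rfl
  | cons ic rest ih =>
    rw [List.foldl_cons, List.flatMap_cons, List.foldl_append, ih, List.foldl_map]

-- B's loop in 'first' mode is the plain reverse overwrite fold
lemma pvB_loop_first (cs : List (List (String × Int × String))) (is : List Int)
    (m : PySem.Dict (String × Int × String) Int) :
    pvB_loop cs "first" m is
      = some (is.foldl
          (fun m repo_index =>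
            (PySem.List.pyGetD cs repo_index []).foldl
              (fun m key => m.insert key repo_index) m) m) := by
  induction is generalizing m with
  | nil => rfl
  | cons i rest ih =>
    simp only [pvB_loop, beq_self_eq_true, if_true, List.foldl_cons]
    exact ih _

-- B's reverse loop, run from repositories j.. already merged, lands on the full forward dict
lemma pvB_loop_run (cs : List (List (String × Int × String))) (overlap : String)
    (hov : (overlap == "first") = false)
    (hnd : overlap = "raise" → cs.flatten.Nodup) :
    ∀ j : Nat, j ≤ cs.length →
      pvB_loop cs overlap (pvR cs j) (PySem.List.pyRange ((j : Int) - 1) (-1) (-1))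
        = some (pvR cs 0) := by
  intro j
  induction j with
  | zero =>
    intro _
    rw [show ((0 : Nat) : Int) - 1 = -1 by norm_num,
      PySem.List.pyRange_neg_one_eq_nil (by norm_num)]
    rfl
  | succ j ih =>
    intro hj
    have hjlt : j < cs.length := by omega
    have hnddrop : overlap = "raise" → ((cs.drop j).flatten).Nodup := by
      intro ho
      have h1 : ((cs.take j).flatten ++ (cs.drop j).flatten).Nodup := by
        rw [← List.flatten_append, List.take_append_drop]; exact hnd ho
      exact (List.nodup_append.mp h1).2.1
    have hsplit : (cs.drop j).flatten = cs[j] ++ (cs.drop (j + 1)).flatten := by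
      rw [List.drop_eq_getElem_cons hjlt, List.flatten_cons]
    have hrepo_nd : overlap = "raise" → cs[j].Nodup := fun ho =>
      (List.nodup_append.mp (hsplit ▸ hnddrop ho)).1
    have hdisj : overlap = "raise" → ∀ k ∈ cs[j], k ∉ (cs.drop (j + 1)).flatten :=
      fun ho k hk hmem => (List.nodup_append.mp (hsplit ▸ hnddrop ho)).2.2 k hk k hmem rfl
    rw [show ((j + 1 : Nat) : Int) - 1 = (j : Int) by push_cast; ring,
      PySem.List.pyRange_neg_one_cons (by exact_mod_cast Int.lt_of_lt_of_le (by norm_num) (Int.natCast_nonneg j))]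
    simp only [pvB_loop, hov, Bool.false_eq_true, if_false]
    have hrepo : PySem.List.pyGetD cs ((j : Int)) [] = cs[j] := by
      rw [PySem.List.pyGetD_natCast, List.getD_eq_getElem _ _ hjlt]
    rw [hrepo]
    rw [pvB_head_eq overlap (j : Int) cs[j] PySem.Dict.empty
      (fun ho => ⟨hrepo_nd ho, fun k _ => PySem.Dict.contains_empty k⟩)]
    have hhead : cs[j].foldl (fun d key => d.insert key (j : Int)) PySem.Dict.empty
        = (cs[j].map (fun k => (k, (j : Int)))).foldl (fun d p => d.insert p.1 p.2)
            PySem.Dict.empty := by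
      rw [List.foldl_map]
    have hcontains : ∀ k : String × Int × String,
        (pvR cs (j + 1)).contains k = decide (k ∈ (cs.drop (j + 1)).flatten) := by
      intro k
      rw [pvR, pvContains_foldl_pairs, pvPairs_fst, PySem.Dict.contains_empty,
        Bool.or_false, List.contains_eq_mem]
    have hguard : (overlap == "raise"
        && ((cs[j].foldl (fun d key => d.insert key (j : Int)) PySem.Dict.empty).items).any
             (fun p => (pvR cs (j + 1)).contains p.1)) = false := by
      by_cases ho : overlap = "raise"
      · rw [Bool.and_eq_false_iff]
        right
        rw [List.any_eq_false]
        intro p hp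
        have hpk : p.1 ∈ cs[j] := by
          have h1 := PySem.Dict.mem_keys_of_mem_items _ hp
          have h2 : (cs[j].foldl (fun d key => d.insert key (j : Int)) PySem.Dict.empty).contains p.1 = true :=
            (PySem.Dict.contains_iff_mem_keys _ _).mpr h1
          rw [hhead, pvContains_foldl_pairs, PySem.Dict.contains_empty, Bool.or_false,
            List.map_map] at h2
          have h3 : (cs[j].map ((fun x => x.1) ∘ fun k => (k, (j : Int)))) = cs[j] := by
            conv_rhs => rw [← List.map_id cs[j]]
            exact List.map_congr_left (fun k _ => rfl)
          rw [h3, List.contains_eq_mem] at h2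
          exact of_decide_eq_true h2
        rw [hcontains]
        simpa using hdisj ho p.1 hpk
      · simp [ho]
    simp only [hguard, Bool.false_eq_true, if_false]
    have hacc : (cs[j].foldl (fun d key => d.insert key (j : Int)) PySem.Dict.empty).update
        (pvR cs (j + 1)).items = pvR cs j := by
      rw [PySem.Dict.update, pvR, pvFoldl_items, pvR, pvPairs_succ cs j hjlt,
        List.foldl_append, hhead]
    rw [hacc]
    exact ih (by omega)

-- the accumulator B starts from is the dict of the (empty) suffix of repositories
lemma pvR_length (cs : List (List (String × Int × String))) :
    pvR cs cs.length = PySem.Dict.empty := by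
  unfold pvR pvPairs
  rw [List.drop_length]
  rfl

-- A's forward enumerate fold is the dict of all repositories
lemma pvA_forward (cs : List (List (String × Int × String))) :
    (PySem.List.enumerate cs).foldl
        (fun m ic => ic.2.foldl (fun m key => m.insert key ic.1) m) PySem.Dict.empty
      = pvR cs 0 := by
  rw [pvNested_eq_pairs, pvR, pvPairs]
  rw [List.drop_zero]
  norm_num

-- ===== VERDICT (by name: the statement is the Claim_ definition above) =====
theorem combination_mapping_to_repo_index_py_spec : Claim_equal_combination_mapping_to_repo_index_py := by
  intro combinations overlap _ hpre
  unfold Spec_combination_mapping_to_repo_index_py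
  unfold combination_mapping_to_repo_index_py combination_mapping_to_repo_index_py_alt
  rcases hpre with h | h | ⟨h, hnd⟩ <;> subst h
  · -- overlap = "first"
    simp only [show (("first" : String) == "first") = true from rfl,
      show (("first" : String) == "raise") = false from rfl,
      show (("first" : String) == "last") = false from rfl,
      Bool.or_false, Bool.false_or, if_true, Bool.false_eq_true, if_false]
    rw [pvB_loop_first]
    rfl
  · -- overlap = "last"
    simp only [show (("last" : String) == "first") = false from rfl,
      show (("last" : String) == "raise") = false from rfl,
      show (("last" : String) == "last") = true from rfl,
      Bool.true_or, Bool.or_true, Bool.false_or, Bool.not_true, if_true,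
      Bool.false_eq_true, if_false]
    rw [pvA_forward, ← pvR_length combinations,
      pvB_loop_run combinations "last" rfl (fun hc => absurd hc (by simp))
        combinations.length (le_refl _)]
  · -- overlap = "raise"
    simp only [show (("raise" : String) == "first") = false from rfl,
      show (("raise" : String) == "raise") = true from rfl,
      show (("raise" : String) == "last") = false from rfl,
      Bool.or_true, Bool.or_false, Bool.not_true, if_true,
      Bool.false_eq_true, if_false, ite_self]
    rw [pvA_forward, ← pvR_length combinations,
      pvB_loop_run combinations "raise" rfl (fun _ => hnd)
        combinations.length (le_refl _)]
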